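-- pv_equiv track=rewrite | github.com/lynn/gimyzba | gismu_utils.py | score_dyad_by_pattern
-- ===== SOURCE A (Python) =====
-- def score_dyad_by_pattern(candidate, input_word):
--     l = len(candidate)
--     iw02 = input_word[0::2]
--     iw12 = input_word[1::2]
--     for i in range(l - 2):
--         dyad = candidate[i] + candidate[i + 2]
--         if dyad in iw02 or dyad in iw12:
--             return 2
--     for i in range(l - 1):
--         if candidate[i] + candidate[i + 1] in input_word:
--             return 2
--     return 0
-- ===== SOURCE B (Python) =====
-- def score_dyad_by_pattern(candidate, input_word):
--     # Index the input word once: bigrams at distance 2 and adjacent bigrams.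
--     skip2 = set(zip(input_word, input_word[2:]))
--     adj = set(zip(input_word, input_word[1:]))
--     n = len(candidate)
--     for i in range(n - 1):
--         if (candidate[i], candidate[i + 1]) in adj or (
--             i + 2 < n and (candidate[i], candidate[i + 2]) in skip2
--         ):
--             return 2
--     return 0
-- ===== Notes on version B (the rewrite author's own statement) =====
-- stated objective: simpler
-- what changed: Instead of two index loops doing substring searches of 2-char dyads inside the even/odd slices and the whole word, B builds the input word's bigram index once (a set of adjacent pairs and a set of distance-2 pairs via zip) and makes a single merged pass over the candidate testing set membership.
import Mathlib
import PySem

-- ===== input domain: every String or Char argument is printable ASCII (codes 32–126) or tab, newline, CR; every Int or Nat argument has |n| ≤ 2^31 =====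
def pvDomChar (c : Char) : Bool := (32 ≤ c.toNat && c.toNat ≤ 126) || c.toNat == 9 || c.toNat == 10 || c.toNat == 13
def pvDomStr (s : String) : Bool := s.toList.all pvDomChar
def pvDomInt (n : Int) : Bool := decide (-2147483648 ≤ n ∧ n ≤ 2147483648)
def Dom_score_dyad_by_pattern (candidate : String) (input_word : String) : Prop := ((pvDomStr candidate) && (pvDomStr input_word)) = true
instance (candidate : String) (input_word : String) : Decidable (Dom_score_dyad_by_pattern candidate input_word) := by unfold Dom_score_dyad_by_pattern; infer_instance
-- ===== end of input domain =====

-- B builds a bigram index of the input word once (sets of adjacent and distance-2 pairs)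
-- and makes one merged pass over the candidate; objective: simpler, same exact result.

-- ===== PORT A =====
-- second loop: for i in range(l - 1): if candidate[i] + candidate[i + 1] in input_word: return 2; (fall through) return 0
def aLoop2 (cs w : List Char) : List Int → Int
  | [] => 0
  | i :: rest =>
    if PySem.Chars.isIn [PySem.List.pyGetD cs i ' ', PySem.List.pyGetD cs (i + 1) ' '] w then 2
    else aLoop2 cs w rest

-- first loop: for i in range(l - 2): dyad = candidate[i] + candidate[i+2]; if dyad in iw02 or dyad in iw12: return 2
def aLoop1 (cs iw02 iw12 w : List Char) (l : Int) : List Int → Int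
  | [] => aLoop2 cs w (PySem.List.pyRange 0 (l - 1) 1)
  | i :: rest =>
    if PySem.Chars.isIn [PySem.List.pyGetD cs i ' ', PySem.List.pyGetD cs (i + 2) ' '] iw02
       || PySem.Chars.isIn [PySem.List.pyGetD cs i ' ', PySem.List.pyGetD cs (i + 2) ' '] iw12 then 2
    else aLoop1 cs iw02 iw12 w l rest

def score_dyad_by_pattern (candidate : String) (input_word : String) : Int :=
  let cs := candidate.toList
  let w := input_word.toList
  let l : Int := cs.length
  let iw02 := (PySem.List.slice? w (some 0) none 2).getD []   -- input_word[0::2]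
  let iw12 := (PySem.List.slice? w (some 1) none 2).getD []   -- input_word[1::2]
  aLoop1 cs iw02 iw12 w l (PySem.List.pyRange 0 (l - 2) 1)

-- ===== PORT B =====
def bLoop (cs : List Char) (n : Int) (skip2 adj : PySem.Set (Char × Char)) : List Int → Int
  | [] => 0
  | i :: rest =>
    if PySem.Set.contains adj (PySem.List.pyGetD cs i ' ', PySem.List.pyGetD cs (i + 1) ' ')
       || (decide (i + 2 < n)
           && PySem.Set.contains skip2 (PySem.List.pyGetD cs i ' ', PySem.List.pyGetD cs (i + 2) ' '))
    then 2 else bLoop cs n skip2 adj rest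

def score_dyad_by_pattern_alt (candidate : String) (input_word : String) : Int :=
  let w := input_word.toList
  let cs := candidate.toList
  let skip2 := PySem.Set.ofList (w.zip (PySem.List.slice w (some 2) none))   -- set(zip(input_word, input_word[2:]))
  let adj := PySem.Set.ofList (w.zip (PySem.List.slice w (some 1) none))     -- set(zip(input_word, input_word[1:]))
  let n : Int := cs.length
  bLoop cs n skip2 adj (PySem.List.pyRange 0 (n - 1) 1)

-- ===== PRECONDITION & SPEC =====
def Spec_score_dyad_by_pattern (candidate : String) (input_word : String) (out : Int) : Prop := out = score_dyad_by_pattern_alt candidate input_word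
instance (candidate : String) (input_word : String) (out : Int) : Decidable (Spec_score_dyad_by_pattern candidate input_word out) := by unfold Spec_score_dyad_by_pattern; infer_instance

-- ===== CLAIM (what is proved, stated in full; the proofs are below) =====
def Claim_equal_score_dyad_by_pattern : Prop := ∀ (candidate : String) (input_word : String), Dom_score_dyad_by_pattern candidate input_word → Spec_score_dyad_by_pattern candidate input_word (score_dyad_by_pattern candidate input_word)

-- ===== LEMMAS AND PROOFS =====

-- "w has the pair (a, b) at some index distance d"
def hasPair (w : List Char) (d : Nat) (a b : Char) : Prop :=
  ∃ j : Nat, w[j]? = some a ∧ w[j + d]? = some b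

theorem prefix_pair_iff (a b : Char) (t : List Char) :
    [a, b] <+: t ↔ t[0]? = some a ∧ t[1]? = some b := by
  match t with
  | [] => simp
  | [x] => simp [List.cons_prefix_cons]
  | x :: y :: u => simp [List.cons_prefix_cons, eq_comm]

-- Python "ab in s" (2-char substring) = the adjacent pair (a, b) occurs in s
theorem isIn_pair_iff (a b : Char) (s : List Char) :
    PySem.Chars.isIn [a, b] s = true ↔ hasPair s 1 a b := by
  rw [← PySem.Chars.exists_prefix_drop_iff_isIn]
  constructor
  · rintro ⟨j, hj⟩
    rw [prefix_pair_iff] at hj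
    exact ⟨j, by simpa [List.getElem?_drop] using hj⟩
  · rintro ⟨j, h1, h2⟩
    exact ⟨j, by rw [prefix_pair_iff]; simpa [List.getElem?_drop] using ⟨h1, h2⟩⟩

theorem mem_zip_drop_iff (w : List Char) (d : Nat) (a b : Char) :
    (a, b) ∈ w.zip (w.drop d) ↔ hasPair w d a b := by
  rw [List.mem_iff_getElem?]
  constructor
  · rintro ⟨j, hj⟩
    rw [List.getElem?_zip_eq_some] at hj
    exact ⟨j, hj.1, by simpa [List.getElem?_drop, Nat.add_comm] using hj.2⟩
  · rintro ⟨j, h1, h2⟩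
    refine ⟨j, ?_⟩
    rw [List.getElem?_zip_eq_some]
    exact ⟨h1, by simpa [List.getElem?_drop, Nat.add_comm] using h2⟩

theorem fmr_length (f : Nat → Option Char) (c : Nat) (hall : ∀ k < c, (f k).isSome) :
    (List.filterMap f (List.range c)).length = c := by
  induction c with
  | zero => simp
  | succ c ih =>
    rw [List.range_succ, List.filterMap_append]
    obtain ⟨v, hv⟩ := Option.isSome_iff_exists.mp (hall c (by omega))
    simp [hv, ih (fun k hk => hall k (by omega))]

theorem fmr_getElem? (f : Nat → Option Char) (c : Nat) (hall : ∀ k < c, (f k).isSome) (j : Nat) :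
    (List.filterMap f (List.range c))[j]? = if j < c then f j else none := by
  induction c with
  | zero => simp
  | succ c ih =>
    have hall' : ∀ k < c, (f k).isSome := fun k hk => hall k (by omega)
    rw [List.range_succ, List.filterMap_append]
    obtain ⟨v, hv⟩ := Option.isSome_iff_exists.mp (hall c (by omega))
    rcases Nat.lt_trichotomy j c with h | h | h
    · rw [List.getElem?_append_left (by rw [fmr_length f c hall']; omega)]
      simp [ih hall', h, Nat.lt_succ_of_lt h]
    · subst h
      rw [List.getElem?_append_right (by rw [fmr_length f j hall'])]
      simp [hv, fmr_length f j hall']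
    · rw [List.getElem?_eq_none (by rw [List.length_append, fmr_length f c hall']; simp [hv]; omega)]
      rw [if_neg (by omega)]

-- indexing w[start::2]: element j is w[start + 2*j]
theorem slice2_getElem? (w : List Char) (start j : Nat) (hs : start ≤ 1) :
    ((PySem.List.slice? w (some (start:Int)) none 2).getD [])[j]? = w[start + 2*j]? := by
  simp only [PySem.List.slice?, PySem.List.sliceIndices]
  norm_num
  rw [if_neg (by omega : ¬ ((start:Int) < 0))]
  by_cases hsl : start < w.length
  · rw [min_eq_left (by exact_mod_cast Nat.le_of_lt hsl)]
    rw [if_pos (by exact_mod_cast hsl)]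
    have hc : (((w.length:Int) - (start:Int) + 2 - 1) / 2).toNat = (w.length - start + 1) / 2 := by omega
    rw [hc]
    set c := (w.length - start + 1) / 2 with hcdef
    have hall : ∀ k < c, (w[((start:Int) + 2 * (k:Int)).toNat]?).isSome := by
      intro k hk
      simp only [isSome_getElem?]
      omega
    rw [fmr_getElem? _ c hall j]
    by_cases hj : j < c
    · rw [if_pos hj]
      have he : ((start:Int) + 2 * (j:Int)).toNat = start + 2 * j := by omega
      rw [he]
    · rw [if_neg hj, List.getElem?_eq_none (by omega)]
  · rw [min_eq_right (by exact_mod_cast Nat.le_of_not_lt hsl)]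
    rw [if_neg (by omega)]
    simp only [List.range_zero, List.filterMap_nil, List.getElem?_nil]
    rw [List.getElem?_eq_none (by omega)]

theorem isIn_iw02_iff (w : List Char) (a b : Char) :
    PySem.Chars.isIn [a, b] ((PySem.List.slice? w (some 0) none 2).getD []) = true ↔
      ∃ j : Nat, w[2*j]? = some a ∧ w[2*j + 2]? = some b := by
  rw [isIn_pair_iff]
  unfold hasPair
  have h0 : ((0:Nat):Int) = (0:Int) := by norm_num
  constructor
  · rintro ⟨j, h1, h2⟩
    rw [← h0, slice2_getElem? w 0 j (by omega), slice2_getElem? w 0 (j+1) (by omega)] at *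
    exact ⟨j, by simpa using h1, by simpa [Nat.mul_add] using h2⟩
  · rintro ⟨j, h1, h2⟩
    refine ⟨j, ?_, ?_⟩
    · rw [← h0, slice2_getElem? w 0 j (by omega)]; simpa using h1
    · rw [← h0, slice2_getElem? w 0 (j+1) (by omega)]; simpa [Nat.mul_add] using h2

theorem isIn_iw12_iff (w : List Char) (a b : Char) :
    PySem.Chars.isIn [a, b] ((PySem.List.slice? w (some 1) none 2).getD []) = true ↔
      ∃ j : Nat, w[2*j + 1]? = some a ∧ w[2*j + 3]? = some b := by
  rw [isIn_pair_iff]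
  unfold hasPair
  have h0 : ((1:Nat):Int) = (1:Int) := by norm_num
  constructor
  · rintro ⟨j, h1, h2⟩
    rw [← h0, slice2_getElem? w 1 j (by omega)] at h1
    rw [← h0, slice2_getElem? w 1 (j+1) (by omega)] at h2
    exact ⟨j, by rwa [show 1 + 2*j = 2*j + 1 from by omega] at h1,
      by rwa [show 1 + 2*(j+1) = 2*j + 3 from by omega] at h2⟩
  · rintro ⟨j, h1, h2⟩
    refine ⟨j, ?_, ?_⟩
    · rw [← h0, slice2_getElem? w 1 j (by omega), show 1 + 2*j = 2*j + 1 from by omega]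
      exact h1
    · rw [← h0, slice2_getElem? w 1 (j+1) (by omega), show 1 + 2*(j+1) = 2*j + 3 from by omega]
      exact h2

-- the even- and odd-offset distance-2 pairs together are exactly all distance-2 pairs
theorem parity_union (w : List Char) (a b : Char) :
    ((∃ j : Nat, w[2*j]? = some a ∧ w[2*j + 2]? = some b) ∨
     (∃ j : Nat, w[2*j + 1]? = some a ∧ w[2*j + 3]? = some b)) ↔ hasPair w 2 a b := by
  constructor
  · rintro (⟨j, h1, h2⟩ | ⟨j, h1, h2⟩)
    · exact ⟨2*j, h1, h2⟩
    · exact ⟨2*j + 1, h1, by simpa [show 2*j + 1 + 2 = 2*j + 3 by omega] using h2⟩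
  · rintro ⟨i, h1, h2⟩
    rcases Nat.even_or_odd i with ⟨k, hk⟩ | ⟨k, hk⟩
    · left
      exact ⟨k, by rwa [show 2*k = i by omega], by rwa [show 2*k + 2 = i + 2 by omega]⟩
    · right
      exact ⟨k, by rwa [show 2*k + 1 = i by omega], by rwa [show 2*k + 3 = i + 2 by omega]⟩

-- B's prebuilt sets test exactly hasPair
theorem contains_adj_iff (w : List Char) (a b : Char) :
    PySem.Set.contains
      (PySem.Set.ofList (w.zip (PySem.List.slice w (some 1) none))) (a, b) = true ↔
      hasPair w 1 a b := by
  have hs : PySem.List.slice w (some 1) none = w.drop 1 := by simp [pysem]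
  rw [hs, PySem.Set.contains_iff, PySem.Set.mem_ofList]
  exact mem_zip_drop_iff w 1 a b

theorem contains_skip_iff (w : List Char) (a b : Char) :
    PySem.Set.contains
      (PySem.Set.ofList (w.zip (PySem.List.slice w (some 2) none))) (a, b) = true ↔
      hasPair w 2 a b := by
  have hs : PySem.List.slice w (some 2) none = w.drop 2 := by simp [pysem]
  rw [hs, PySem.Set.contains_iff, PySem.Set.mem_ofList]
  exact mem_zip_drop_iff w 2 a b

-- loop characterisations
theorem aLoop2_eq (cs w : List Char) (L : List Int) :
    aLoop2 cs w L =
      if L.any (fun i =>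
          PySem.Chars.isIn [PySem.List.pyGetD cs i ' ', PySem.List.pyGetD cs (i + 1) ' '] w)
      then 2 else 0 := by
  induction L with
  | nil => simp [aLoop2]
  | cons i rest ih =>
    rw [aLoop2, List.any_cons, ih]
    by_cases h : PySem.Chars.isIn [PySem.List.pyGetD cs i ' ', PySem.List.pyGetD cs (i + 1) ' '] w = true
    · simp [h]
    · simp [h]

theorem aLoop1_eq (cs iw02 iw12 w : List Char) (l : Int) (L : List Int) :
    aLoop1 cs iw02 iw12 w l L =
      if L.any (fun i =>
          PySem.Chars.isIn [PySem.List.pyGetD cs i ' ', PySem.List.pyGetD cs (i + 2) ' '] iw02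
          || PySem.Chars.isIn [PySem.List.pyGetD cs i ' ', PySem.List.pyGetD cs (i + 2) ' '] iw12)
      then 2 else aLoop2 cs w (PySem.List.pyRange 0 (l - 1) 1) := by
  induction L with
  | nil => simp [aLoop1]
  | cons i rest ih =>
    rw [aLoop1, List.any_cons, ih]
    by_cases h : (PySem.Chars.isIn [PySem.List.pyGetD cs i ' ', PySem.List.pyGetD cs (i + 2) ' '] iw02
        || PySem.Chars.isIn [PySem.List.pyGetD cs i ' ', PySem.List.pyGetD cs (i + 2) ' '] iw12) = true
    · simp [h]
    · simp [h]

theorem bLoop_eq (cs : List Char) (n : Int) (skip2 adj : PySem.Set (Char × Char)) (L : List Int) :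
    bLoop cs n skip2 adj L =
      if L.any (fun i =>
          PySem.Set.contains adj (PySem.List.pyGetD cs i ' ', PySem.List.pyGetD cs (i + 1) ' ')
          || (decide (i + 2 < n)
              && PySem.Set.contains skip2 (PySem.List.pyGetD cs i ' ', PySem.List.pyGetD cs (i + 2) ' ')))
      then 2 else 0 := by
  induction L with
  | nil => simp [bLoop]
  | cons i rest ih =>
    rw [bLoop, List.any_cons, ih]
    by_cases h : (PySem.Set.contains adj (PySem.List.pyGetD cs i ' ', PySem.List.pyGetD cs (i + 1) ' ')
        || (decide (i + 2 < n)
            && PySem.Set.contains skip2 (PySem.List.pyGetD cs i ' ', PySem.List.pyGetD cs (i + 2) ' '))) = true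
    · rw [if_pos h, h, Bool.true_or, if_pos rfl]
    · have h' : (PySem.Set.contains adj (PySem.List.pyGetD cs i ' ', PySem.List.pyGetD cs (i + 1) ' ')
          || (decide (i + 2 < n)
              && PySem.Set.contains skip2 (PySem.List.pyGetD cs i ' ', PySem.List.pyGetD cs (i + 2) ' '))) = false :=
        Bool.not_eq_true _ ▸ h
      rw [if_neg h, h', Bool.false_or]

-- the central logical equivalence between the two search orders (g abstracts candidate indexing)
theorem central (n : Int) (H1 H2 : Int → Prop) :
    ((∃ i : Int, (0 ≤ i ∧ i < n - 2) ∧ H2 i) ∨ (∃ i : Int, (0 ≤ i ∧ i < n - 1) ∧ H1 i)) ↔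
    (∃ i : Int, (0 ≤ i ∧ i < n - 1) ∧ (H1 i ∨ ((i + 2 < n) ∧ H2 i))) := by
  constructor
  · rintro (⟨i, ⟨h0, h1⟩, hp⟩ | ⟨i, hb, hp⟩)
    · exact ⟨i, ⟨h0, by omega⟩, Or.inr ⟨by omega, hp⟩⟩
    · exact ⟨i, hb, Or.inl hp⟩
  · rintro ⟨i, hb, hp | hp⟩
    · right; exact ⟨i, hb, hp⟩
    · left; exact ⟨i, ⟨hb.1, by omega⟩, hp.2⟩

-- ===== VERDICT (by name: the statement is the Claim_ definition above) =====
theorem score_dyad_by_pattern_spec : Claim_equal_score_dyad_by_pattern := by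
  intro candidate input_word _
  simp only [Spec_score_dyad_by_pattern, score_dyad_by_pattern, score_dyad_by_pattern_alt]
  rw [aLoop1_eq, aLoop2_eq, bLoop_eq]
  set cs := candidate.toList with hcs
  set w := input_word.toList with hw
  set A1 := (PySem.List.pyRange 0 ((cs.length : Int) - 2) 1).any (fun i =>
      PySem.Chars.isIn [PySem.List.pyGetD cs i ' ', PySem.List.pyGetD cs (i + 2) ' ']
          ((PySem.List.slice? w (some 0) none 2).getD [])
      || PySem.Chars.isIn [PySem.List.pyGetD cs i ' ', PySem.List.pyGetD cs (i + 2) ' ']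
          ((PySem.List.slice? w (some 1) none 2).getD [])) with hA1def
  set A2 := (PySem.List.pyRange 0 ((cs.length : Int) - 1) 1).any (fun i =>
      PySem.Chars.isIn [PySem.List.pyGetD cs i ' ', PySem.List.pyGetD cs (i + 1) ' '] w) with hA2def
  set B := (PySem.List.pyRange 0 ((cs.length : Int) - 1) 1).any (fun i =>
      PySem.Set.contains (PySem.Set.ofList (w.zip (PySem.List.slice w (some 1) none)))
          (PySem.List.pyGetD cs i ' ', PySem.List.pyGetD cs (i + 1) ' ')
      || (decide (i + 2 < (cs.length : Int))
          && PySem.Set.contains (PySem.Set.ofList (w.zip (PySem.List.slice w (some 2) none)))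
              (PySem.List.pyGetD cs i ' ', PySem.List.pyGetD cs (i + 2) ' '))) with hBdef
  have hkey : (A1 || A2) = B := by
    rw [hA1def, hA2def, hBdef, Bool.eq_iff_iff]
    simp only [Bool.or_eq_true, List.any_eq_true, PySem.List.mem_pyRange_one,
      isIn_iw02_iff, isIn_iw12_iff]
    simp only [Bool.and_eq_true, decide_eq_true_iff, isIn_pair_iff,
      contains_adj_iff, contains_skip_iff]
    have hc := central (cs.length : Int)
      (fun i => hasPair w 1 (PySem.List.pyGetD cs i ' ') (PySem.List.pyGetD cs (i + 1) ' '))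
      (fun i => hasPair w 2 (PySem.List.pyGetD cs i ' ') (PySem.List.pyGetD cs (i + 2) ' '))
    constructor
    · intro h
      refine (hc.mp ?_).imp fun i hi => ⟨hi.1, hi.2⟩
      rcases h with ⟨i, hi, hp⟩ | h
      · exact Or.inl ⟨i, hi, (parity_union w _ _).mp hp⟩
      · exact Or.inr h
    · intro h
      rcases hc.mpr (h.imp fun i hi => ⟨hi.1, hi.2⟩) with ⟨i, hi, hp⟩ | h
      · exact Or.inl ⟨i, hi, (parity_union w _ _).mpr hp⟩
      · exact Or.inr h
  cases hA1c : A1 <;> cases hA2c : A2 <;>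
    rw [hA1c, hA2c] at hkey <;>
    simp only [Bool.true_or, Bool.false_or, Bool.or_self] at hkey <;>
    rw [← hkey] <;> simp
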